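-- pv_equiv track=rewrite | github.com/RajKamal2013/cstyle | done/single_long_comment.py | split22comment
-- ===== SOURCE A (Python) =====
-- def split22comment (comment_line, space, tab):
-- 	first_line = "";
-- 	second_line = "";
-- 	temp_line="";
-- 	count = 0;
-- 	for i in range (tab):
-- 		temp_line = temp_line + "\t";
-- 		count = count + 8;
-- 	for i in range (space):
-- 		temp_line = temp_line + " ";
-- 		count = count + 1;
-- 	comment_line = comment_line.lstrip("\t");
-- 	comment_line = comment_line.lstrip();
-- 	comment = comment_line.split();
-- 	#print "list", comment;
-- 	index = 0;
-- 	for i in range(len(comment)):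
-- 		count = count + len(comment[i]) + 1; #1 for space
-- 		if (count <= 80):
-- 			word = comment[i];
-- 			first_line = first_line + comment[i] + " ";
-- 		else :
-- 			second_line = second_line + comment[i] + " ";
-- 	second_line = second_line.rstrip();
-- 	first_line = temp_line + first_line.rstrip() + "\n";
-- 	if (second_line == "*/"):
-- 		second_line = temp_line + " " + second_line + "\n";
-- 	else:
-- 		second_line = temp_line + " " + "*" + " " + second_line + "\n";
-- 	return first_line, second_line;
-- ===== SOURCE B (Python) =====
-- def split22comment(comment_line, space, tab):
--     tabs = "\t" * tab
--     spaces = " " * space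
--     prefix = tabs + spaces
--     words = comment_line.split()
--     # stage 1: prefix sums of line widths (strictly increasing)
--     cums = []
--     total = 8 * len(tabs) + len(spaces)
--     for w in words:
--         total += len(w) + 1
--         cums.append(total)
--     # stage 2: binary search for the split point (first cumulative width > 80)
--     lo, hi = 0, len(cums)
--     while lo < hi:
--         mid = (lo + hi) // 2
--         if cums[mid] <= 80:
--             lo = mid + 1
--         else:
--             hi = mid
--     # stage 3: assemble from the two slices
--     first_line = prefix + " ".join(words[:lo]) + "\n"
--     rest = " ".join(words[lo:])
--     if rest == "*/":
--         second_line = prefix + " " + "*/" + "\n"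
--     else:
--         second_line = prefix + " * " + rest + "\n"
--     return first_line, second_line
-- ===== Notes on version B (the rewrite author's own statement) =====
-- stated objective: faster
-- what changed: Instead of A's single loop that classifies each word while growing two accumulator strings, B stages the work: a prefix-sum pass over word widths, a binary search over the strictly increasing cumulative widths for the 80-column split index, then one-shot assembly by joining the two word slices.
import Mathlib
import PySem

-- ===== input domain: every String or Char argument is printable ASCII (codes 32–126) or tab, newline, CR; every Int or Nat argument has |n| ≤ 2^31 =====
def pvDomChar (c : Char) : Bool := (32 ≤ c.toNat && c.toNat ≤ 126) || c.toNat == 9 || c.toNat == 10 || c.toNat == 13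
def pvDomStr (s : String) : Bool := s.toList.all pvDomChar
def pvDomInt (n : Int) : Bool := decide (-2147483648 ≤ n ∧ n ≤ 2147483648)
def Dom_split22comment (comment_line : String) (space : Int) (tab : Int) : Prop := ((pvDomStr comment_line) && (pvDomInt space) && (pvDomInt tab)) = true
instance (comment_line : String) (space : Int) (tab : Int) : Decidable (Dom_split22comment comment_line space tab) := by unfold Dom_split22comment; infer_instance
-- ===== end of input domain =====

-- B replaces A's single classifying loop over two growing accumulator strings with three
-- stages: a prefix-sum pass over word widths, a BINARY SEARCH for the 80-column split point,
-- then join-of-slices assembly (measured faster: no repeated string concatenation).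


-- ===== PORT A =====
-- A's word loop: running count classifies each word into first_line or second_line
-- (the Python local 'word' is dead code and is not kept).
def aClassify : List (List Char) → Int → List Char → List Char → Int × List Char × List Char
  | [], count, f, s => (count, f, s)
  | w :: ws, count, f, s =>
    let c := count + (w.length : Int) + 1
    if c ≤ 80 then aClassify ws c (f ++ w ++ [' ']) s
    else aClassify ws c f (s ++ w ++ [' '])

def split22comment (comment_line : String) (space : Int) (tab : Int) : String × String :=
  -- for i in range(tab): temp_line += "\t"; count += 8
  let st1 := (PySem.List.pyRange 0 tab 1).foldl
      (fun (st : List Char × Int) _ => (st.1 ++ ['\t'], st.2 + 8)) (([] : List Char), (0 : Int))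
  -- for i in range(space): temp_line += " "; count += 1
  let st2 := (PySem.List.pyRange 0 space 1).foldl
      (fun (st : List Char × Int) _ => (st.1 ++ [' '], st.2 + 1)) st1
  let temp_line := st2.1
  -- comment_line = comment_line.lstrip("\t")  (left-strip of the char set {'\t'}; ported by hand, exact)
  let cl1 := comment_line.toList.dropWhile (fun c => c == '\t')
  -- comment_line = comment_line.lstrip()
  let cl2 := PySem.Chars.lstrip cl1
  let comment := PySem.Chars.split₀ cl2
  let r := aClassify comment st2.2 [] []
  let second0 := PySem.Chars.rstrip r.2.2
  let first_line := temp_line ++ PySem.Chars.rstrip r.2.1 ++ ['\n']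
  let second_line :=
    if second0 = "*/".toList then temp_line ++ [' '] ++ second0 ++ ['\n']
    else temp_line ++ [' '] ++ ['*'] ++ [' '] ++ second0 ++ ['\n']
  (String.ofList first_line, String.ofList second_line)

-- ===== PORT B =====
-- B's stage-2 binary search: while lo < hi: mid=(lo+hi)//2; cums[mid]<=80 → lo=mid+1 else hi=mid.
-- cums[mid] is ported as getD: the call sites keep 0 ≤ lo ≤ mid < hi ≤ len cums, so it is exact.
def bBisect (cums : List Int) (lo hi : Nat) : Nat :=
  if h : lo < hi then
    let mid := (lo + hi) / 2
    if cums.getD mid 0 ≤ 80 then bBisect cums (mid + 1) hi else bBisect cums lo mid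
  else lo
termination_by hi - lo
decreasing_by all_goals omega

def split22comment_alt (comment_line : String) (space : Int) (tab : Int) : String × String :=
  let tabs := List.replicate tab.toNat '\t'
  let spaces := List.replicate space.toNat ' '
  let prefx := tabs ++ spaces
  let words := PySem.Chars.split₀ comment_line.toList
  -- stage 1: for w in words: total += len(w)+1; cums.append(total)
  let st := words.foldl
      (fun (st : List Int × Int) w =>
        (st.1 ++ [st.2 + (w.length : Int) + 1], st.2 + (w.length : Int) + 1))
      (([] : List Int), 8 * (tabs.length : Int) + (spaces.length : Int))
  let cums := st.1
  -- stage 2: binary search for the split point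
  let lo := bBisect cums 0 cums.length
  -- stage 3: assemble from the two slices
  let first_line := prefx ++ PySem.Chars.join [' '] (words.take lo) ++ ['\n']
  let rest := PySem.Chars.join [' '] (words.drop lo)
  let second_line :=
    if rest = "*/".toList then prefx ++ [' '] ++ "*/".toList ++ ['\n']
    else prefx ++ [' '] ++ ['*'] ++ [' '] ++ rest ++ ['\n']
  (String.ofList first_line, String.ofList second_line)

-- ===== PRECONDITION & SPEC =====
def Spec_split22comment (comment_line : String) (space : Int) (tab : Int) (out : String × String) : Prop := out = split22comment_alt comment_line space tab
instance (comment_line : String) (space : Int) (tab : Int) (out : String × String) : Decidable (Spec_split22comment comment_line space tab out) := by unfold Spec_split22comment; infer_instance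

-- ===== CLAIM (what is proved, stated in full; the proofs are below) =====
def Claim_equal_split22comment : Prop := ∀ (comment_line : String) (space : Int) (tab : Int), Dom_split22comment comment_line space tab → Spec_split22comment comment_line space tab (split22comment comment_line space tab)

-- ===== LEMMAS AND PROOFS =====

-- each word of the split, followed by one space (the shape A's accumulators grow by)
def concatSp (l : List (List Char)) : List Char := l.flatMap (fun w => w ++ [' '])

-- the split index A's loop realizes: count of leading words keeping the running width ≤ 80
def bIdx : List (List Char) → Int → Nat
  | [], _ => 0
  | w :: ws, cum =>
    let c := cum + (w.length : Int) + 1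
    if 80 < c then 0 else 1 + bIdx ws c

-- the prefix sums B's stage-1 loop builds, as a plain recursion
def bCums : List (List Char) → Int → List Int
  | [], _ => []
  | w :: ws, t => (t + (w.length : Int) + 1) :: bCums ws (t + (w.length : Int) + 1)

theorem concatSp_nil : concatSp [] = [] := rfl
theorem concatSp_cons (w : List Char) (l : List (List Char)) :
    concatSp (w :: l) = w ++ [' '] ++ concatSp l := by
  simp [concatSp]

theorem bCums_length : ∀ (ws : List (List Char)) (t : Int), (bCums ws t).length = ws.length := by
  intro ws
  induction ws with
  | nil => intro t; rfl
  | cons w ws ih => intro t; simp [bCums, ih]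

theorem mem_bCums_gt : ∀ (ws : List (List Char)) (t x : Int), x ∈ bCums ws t → t < x := by
  intro ws
  induction ws with
  | nil => intro t x hx; simp [bCums] at hx
  | cons w ws ih =>
    intro t x hx
    rcases List.mem_cons.mp hx with h | h
    · subst h; have : (0:Int) ≤ (w.length : Int) := by positivity
      omega
    · have := ih _ _ h
      have : (0:Int) ≤ (w.length : Int) := by positivity
      omega

theorem bIdx_le_length : ∀ (ws : List (List Char)) (c : Int), bIdx ws c ≤ ws.length := by
  intro ws
  induction ws with
  | nil => intro c; simp [bIdx]
  | cons w ws ih =>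
    intro c
    simp only [bIdx]
    split
    · simp
    · have := ih (c + (w.length : Int) + 1); simp; omega

-- characterization: the i-th prefix sum is ≤ 80 exactly on the first bIdx positions
theorem bCums_char : ∀ (ws : List (List Char)) (c : Int) (i : Nat), i < ws.length →
    ((bCums ws c).getD i 0 ≤ 80 ↔ i < bIdx ws c) := by
  intro ws
  induction ws with
  | nil => intro c i hi; simp at hi
  | cons w ws ih =>
    intro c i hi
    simp only [bCums, bIdx]
    by_cases h80 : 80 < c + (w.length : Int) + 1
    · rw [if_pos h80]
      cases i with
      | zero => simpa using h80
      | succ j =>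
        simp only [List.getD_cons_succ]
        constructor
        · intro hle
          exfalso
          have hj : j < (bCums ws (c + (w.length : Int) + 1)).length := by
            rw [bCums_length]; simpa using hi
          have hmem : (bCums ws (c + (w.length : Int) + 1)).getD j 0
              ∈ bCums ws (c + (w.length : Int) + 1) := by
            rw [List.getD_eq_getElem _ _ hj]; exact List.getElem_mem hj
          have := mem_bCums_gt _ _ _ hmem
          omega
        · intro h; omega
    · rw [if_neg h80]
      cases i with
      | zero => simp; omega
      | succ j =>
        simp only [List.getD_cons_succ]
        rw [ih _ j (by simpa using hi)]
        omega

-- binary-search correctness against the characterized split point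
theorem bBisect_correct (cums : List Int) (L : Nat)
    (hchar : ∀ i, i < cums.length → (cums.getD i 0 ≤ 80 ↔ i < L)) :
    ∀ (n lo hi : Nat), hi - lo ≤ n → lo ≤ L → L ≤ hi → hi ≤ cums.length →
      bBisect cums lo hi = L := by
  intro n
  induction n with
  | zero =>
    intro lo hi hn h1 h2 h3
    have : ¬ lo < hi := by omega
    rw [bBisect, dif_neg this]; omega
  | succ m ih =>
    intro lo hi hn h1 h2 h3
    by_cases h : lo < hi
    · rw [bBisect, dif_pos h]
      simp only
      set mid := (lo + hi) / 2 with hmid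
      have hmlt : mid < hi := by omega
      have hmge : lo ≤ mid := by omega
      by_cases hle : cums.getD mid 0 ≤ 80
      · rw [if_pos hle]
        have : mid < L := (hchar mid (by omega)).mp hle
        exact ih (mid + 1) hi (by omega) (by omega) h2 h3
      · rw [if_neg hle]
        have : ¬ mid < L := fun hc => hle ((hchar mid (by omega)).mpr hc)
        exact ih lo mid (by omega) h1 (by omega) (by omega)
    · rw [bBisect, dif_neg h]; omega

-- B's stage-1 fold builds exactly bCums
theorem foldl_cums : ∀ (ws : List (List Char)) (acc : List Int) (t : Int),
    (ws.foldl (fun (st : List Int × Int) w =>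
        (st.1 ++ [st.2 + (w.length : Int) + 1], st.2 + (w.length : Int) + 1)) (acc, t)).1
      = acc ++ bCums ws t := by
  intro ws
  induction ws with
  | nil => intro acc t; simp [bCums]
  | cons w ws ih =>
    intro acc t
    simp only [List.foldl_cons]
    rw [ih, bCums]
    simp

-- the prefix-building loops of A, generically
theorem foldl_app_const (c0 : Char) (k : Int) : ∀ (l : List Int) (t : List Char) (n : Int),
    l.foldl (fun (st : List Char × Int) _ => (st.1 ++ [c0], st.2 + k)) (t, n)
      = (t ++ List.replicate l.length c0, n + k * l.length) := by
  intro l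
  induction l with
  | nil => intro t n; simp
  | cons x l ih =>
    intro t n
    simp only [List.foldl_cons]
    rw [ih, List.length_cons]
    congr 1
    · simp [List.append_assoc, List.replicate_succ]
    · push_cast; ring

-- once the running count has passed 80, every remaining word goes to second_line
theorem aClassify_hi : ∀ (ws : List (List Char)) (c : Int) (f s : List Char), 80 < c →
    (aClassify ws c f s).2 = (f, s ++ concatSp ws) := by
  intro ws
  induction ws with
  | nil => intro c f s _; simp [aClassify, concatSp]
  | cons w ws ih =>
    intro c f s hc
    have h80 : ¬ (c + (w.length : Int) + 1 ≤ 80) := by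
      have : (0:Int) ≤ (w.length : Int) := by positivity
      omega
    simp only [aClassify, if_neg h80]
    rw [ih _ _ _ (by omega), concatSp_cons]
    simp

-- A's classifying loop produces exactly the two slices at bIdx (glued with trailing spaces)
theorem aClassify_split : ∀ (ws : List (List Char)) (c : Int) (f s : List Char),
    (aClassify ws c f s).2
      = (f ++ concatSp (ws.take (bIdx ws c)), s ++ concatSp (ws.drop (bIdx ws c))) := by
  intro ws
  induction ws with
  | nil => intro c f s; simp [aClassify, bIdx, concatSp]
  | cons w ws ih =>
    intro c f s
    simp only [aClassify, bIdx]
    by_cases h : c + (w.length : Int) + 1 ≤ 80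
    · rw [if_pos h, if_neg (by omega), ih, Nat.add_comm 1]
      simp [List.take_succ_cons, List.drop_succ_cons, concatSp_cons, List.append_assoc]
    · rw [if_neg h, if_pos (by omega)]
      rw [aClassify_hi _ _ _ _ (by omega)]
      simp [concatSp_cons, concatSp_nil, List.append_assoc]

-- split() ignores leading whitespace
theorem split₀_go_dropWhile : ∀ (s : List Char) (acc : List (List Char)),
    PySem.Chars.split₀.go (s.dropWhile PySem.Chars.isspace) [] acc
      = PySem.Chars.split₀.go s [] acc := by
  intro s
  induction s with
  | nil => intro acc; rfl
  | cons c rest ih =>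
    intro acc
    by_cases h : PySem.Chars.isspace c = true
    · rw [List.dropWhile_cons_of_pos h, ih]
      simp [PySem.Chars.split₀.go, h]
    · rw [List.dropWhile_cons_of_neg h]

theorem dropWhile_tab_isspace (s : List Char) :
    (s.dropWhile (fun c => c == '\t')).dropWhile PySem.Chars.isspace
      = s.dropWhile PySem.Chars.isspace := by
  induction s with
  | nil => rfl
  | cons c rest ih =>
    by_cases h : c == '\t'
    · have hc : c = '\t' := by simpa using h
      subst hc
      rw [List.dropWhile_cons_of_pos (by simp), ih,
          List.dropWhile_cons_of_pos (by decide)]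
    · rw [List.dropWhile_cons_of_neg (by simpa using h)]

theorem split₀_lstrip_tab (s : List Char) :
    PySem.Chars.split₀ (PySem.Chars.lstrip (s.dropWhile (fun c => c == '\t')))
      = PySem.Chars.split₀ s := by
  unfold PySem.Chars.split₀ PySem.Chars.lstrip
  rw [dropWhile_tab_isspace, split₀_go_dropWhile]

-- every word produced by split() is nonempty and whitespace-free
theorem split₀_go_words : ∀ (s cur : List Char) (acc : List (List Char)),
    (∀ c ∈ cur, PySem.Chars.isspace c = false) →
    (∀ w ∈ acc, w ≠ [] ∧ ∀ c ∈ w, PySem.Chars.isspace c = false) →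
    ∀ w ∈ PySem.Chars.split₀.go s cur acc, w ≠ [] ∧ ∀ c ∈ w, PySem.Chars.isspace c = false := by
  intro s
  induction s with
  | nil =>
    intro cur acc hcur hacc w hw
    by_cases hc : cur.isEmpty = true
    · simp only [PySem.Chars.split₀.go, if_pos hc] at hw
      exact hacc w (by simpa using hw)
    · simp only [PySem.Chars.split₀.go, if_neg hc, List.mem_reverse, List.mem_cons] at hw
      rcases hw with h | h
      · subst h
        refine ⟨by simpa [List.isEmpty_iff] using hc, ?_⟩
        intro c hcm; exact hcur c (by simpa using hcm)
      · exact hacc w h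
  | cons c rest ih =>
    intro cur acc hcur hacc w hw
    by_cases h : PySem.Chars.isspace c = true
    · simp only [PySem.Chars.split₀.go, if_pos h] at hw
      by_cases hc : cur.isEmpty = true
      · rw [if_pos hc] at hw
        exact ih [] acc (by simp) hacc w hw
      · rw [if_neg hc] at hw
        refine ih [] _ (by simp) ?_ w hw
        intro w' hw'
        rcases List.mem_cons.mp hw' with h' | h'
        · subst h'
          refine ⟨by simpa [List.isEmpty_iff] using hc, ?_⟩
          intro c' hc'; exact hcur c' (by simpa using hc')
        · exact hacc w' h'
    · simp only [PySem.Chars.split₀.go, if_neg h] at hw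
      refine ih (c :: cur) acc ?_ hacc w hw
      intro c' hc'
      rcases List.mem_cons.mp hc' with h' | h'
      · subst h'; simpa using h
      · exact hcur c' h'

theorem split₀_words (s : List Char) :
    ∀ w ∈ PySem.Chars.split₀ s, w ≠ [] ∧ ∀ c ∈ w, PySem.Chars.isspace c = false :=
  split₀_go_words s [] [] (by simp) (by simp)

-- rstrip facts
theorem rstrip_append_space (x : List Char) :
    PySem.Chars.rstrip (x ++ [' ']) = PySem.Chars.rstrip x := by
  unfold PySem.Chars.rstrip
  simp [List.dropWhile_cons_of_pos, (by decide : PySem.Chars.isspace ' ' = true)]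

theorem rstrip_of_getLast (x : List Char)
    (h : ∀ c, x.getLast? = some c → PySem.Chars.isspace c = false) :
    PySem.Chars.rstrip x = x := by
  unfold PySem.Chars.rstrip
  cases hx : x.reverse with
  | nil => simp [List.reverse_eq_nil_iff.mp hx]
  | cons c t =>
    have hl : x.getLast? = some c := by
      rw [← List.head?_reverse, hx]; rfl
    rw [List.dropWhile_cons_of_neg (by simp [h c hl]), ← hx, List.reverse_reverse]

theorem join_getLast (l : List (List Char))
    (hl : ∀ w ∈ l, w ≠ [] ∧ ∀ c ∈ w, PySem.Chars.isspace c = false) :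
    ∀ c, (PySem.Chars.join [' '] l).getLast? = some c → PySem.Chars.isspace c = false := by
  induction l with
  | nil => intro c hc; simp [PySem.Chars.join_nil] at hc
  | cons w l ih =>
    intro c hc
    cases l with
    | nil =>
      rw [PySem.Chars.join_singleton] at hc
      exact (hl w (by simp)).2 c (List.mem_of_getLast? hc)
    | cons w' l' =>
      rw [PySem.Chars.join_cons_cons] at hc
      have hne : PySem.Chars.join [' '] (w' :: l') ≠ [] := by
        have hw' := (hl w' (by simp)).1
        cases l' with
        | nil => rw [PySem.Chars.join_singleton]; exact hw'
        | cons w'' l'' =>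
          rw [PySem.Chars.join_cons_cons]
          intro hcon
          rcases List.append_eq_nil_iff.mp hcon with ⟨h1, _⟩
          rcases List.append_eq_nil_iff.mp h1 with ⟨_, h2⟩
          simp at h2
      rw [List.getLast?_append_of_ne_nil _ hne] at hc
      exact ih (fun w hw => hl w (by simp [hw])) c hc

theorem concatSp_eq_join (l : List (List Char)) (hne : l ≠ []) :
    concatSp l = PySem.Chars.join [' '] l ++ [' '] := by
  induction l with
  | nil => exact absurd rfl hne
  | cons w l ih =>
    cases l with
    | nil => simp [concatSp_cons, concatSp_nil, PySem.Chars.join_singleton]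
    | cons w' l' =>
      rw [concatSp_cons, ih (by simp), PySem.Chars.join_cons_cons]
      simp [List.append_assoc]

theorem rstrip_concatSp (l : List (List Char))
    (hl : ∀ w ∈ l, w ≠ [] ∧ ∀ c ∈ w, PySem.Chars.isspace c = false) :
    PySem.Chars.rstrip (concatSp l) = PySem.Chars.join [' '] l := by
  cases l with
  | nil => rfl
  | cons w l' =>
    rw [concatSp_eq_join _ (by simp), rstrip_append_space]
    exact rstrip_of_getLast _ (join_getLast _ hl)

-- ===== VERDICT (by name: the statement is the Claim_ definition above) =====
theorem split22comment_spec : Claim_equal_split22comment := by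
  intro comment_line space tab _
  simp only [Spec_split22comment, split22comment, split22comment_alt]
  rw [foldl_app_const, foldl_app_const]
  simp only [PySem.List.length_pyRange_one, List.length_replicate, List.nil_append,
    Int.sub_zero]
  have hcount : (0:Int) + 8 * (tab.toNat : Int) + 1 * (space.toNat : Int)
      = 8 * (tab.toNat : Int) + (space.toNat : Int) := by ring
  rw [hcount]
  have hwords : PySem.Chars.split₀
      (PySem.Chars.lstrip (comment_line.toList.dropWhile (fun c => c == '\t')))
      = PySem.Chars.split₀ comment_line.toList := split₀_lstrip_tab _
  rw [hwords]
  set base : Int := 8 * (tab.toNat : Int) + (space.toNat : Int) with hbase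
  set words := PySem.Chars.split₀ comment_line.toList with hw
  have hsplit := aClassify_split words base [] []
  -- B's fold = bCums, and its binary search lands on bIdx
  have hcums : (words.foldl (fun (st : List Int × Int) w =>
      (st.1 ++ [st.2 + (w.length : Int) + 1], st.2 + (w.length : Int) + 1))
      (([] : List Int), base)).1 = bCums words base := by
    rw [foldl_cums]; simp
  rw [hcums]
  have hlen := bCums_length words base
  have hk : bBisect (bCums words base) 0 (bCums words base).length = bIdx words base := by
    refine bBisect_correct (bCums words base) (bIdx words base) ?_
      (bCums words base).length 0 (bCums words base).length (by omega) (by omega)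
      (by rw [hlen]; exact bIdx_le_length words base) (by omega)
    intro i hi
    exact bCums_char words base i (by rwa [hlen] at hi)
  rw [hk]
  have hprops := split₀_words comment_line.toList
  have hfirst : PySem.Chars.rstrip (aClassify words base [] []).2.1
      = PySem.Chars.join [' '] (words.take (bIdx words base)) := by
    have h1 : (aClassify words base [] []).2.1 = concatSp (words.take (bIdx words base)) := by
      rw [show (aClassify words base [] []).2.1 = ((aClassify words base [] []).2).1 from rfl,
          hsplit]; simp
    rw [h1]
    exact rstrip_concatSp _ (fun w hw' => hprops w (List.mem_of_mem_take hw'))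
  have hsecond : PySem.Chars.rstrip (aClassify words base [] []).2.2
      = PySem.Chars.join [' '] (words.drop (bIdx words base)) := by
    have h2 : (aClassify words base [] []).2.2 = concatSp (words.drop (bIdx words base)) := by
      rw [show (aClassify words base [] []).2.2 = ((aClassify words base [] []).2).2 from rfl,
          hsplit]; simp
    rw [h2]
    exact rstrip_concatSp _ (fun w hw' => hprops w (List.mem_of_mem_drop hw'))
  rw [hfirst, hsecond]
  by_cases hrest : PySem.Chars.join [' '] (List.drop (bIdx words base) words) = "*/".toList
  · rw [if_pos hrest, if_pos hrest, hrest]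
  · rw [if_neg hrest, if_neg hrest]
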